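-- pv_equiv track=rewrite | github.com/Vinit610/screener-ai | pipeline/fetch_mf_details.py | normalize_category
-- ===== SOURCE A (Python) =====
-- from typing import Dict, List, Optional
--
-- def normalize_category(scheme_category: str) -> Optional[str]:
--     """Normalize MFAPI / AMFI scheme_category to our lookup key."""
--     if not scheme_category:
--         return None
--     cat = scheme_category.lower().strip()
--     # Remove prefixes like "Equity Scheme - ", "Debt Scheme - ", "Hybrid Scheme - "
--     for prefix in ('equity scheme - ', 'debt scheme - ', 'hybrid scheme - ',
--                    'solution oriented scheme - ', 'other scheme - '):
--         if cat.startswith(prefix):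
--             cat = cat[len(prefix):]
--             break
--     return cat.strip()
-- ===== SOURCE B (Python) =====
-- from typing import Optional
--
-- # Known top-level category labels (prefixes without the ' - ' separator).
-- _LABELS = {'equity scheme', 'debt scheme', 'hybrid scheme',
--            'solution oriented scheme', 'other scheme'}
--
-- def normalize_category(scheme_category: str) -> Optional[str]:
--     """Normalize MFAPI / AMFI scheme_category to our lookup key."""
--     if not scheme_category:
--         return None
--     cat = scheme_category.lower().strip()
--     # Split once at the first ' - '; drop the head iff it is a known label.
--     head, sep, tail = cat.partition(' - ')
--     if sep and head in _LABELS: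
--         cat = tail
--     return cat.strip()
-- ===== Notes on version B (the rewrite author's own statement) =====
-- stated objective: simpler
-- what changed: Instead of scanning five candidate prefixes with startswith, B partitions the string once at the first occurrence of the separator and drops the head iff it is one of the five known labels; correct because no label contains the separator or ends with a fragment of it, so a matching prefix's separator is always the first occurrence.
import Mathlib
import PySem

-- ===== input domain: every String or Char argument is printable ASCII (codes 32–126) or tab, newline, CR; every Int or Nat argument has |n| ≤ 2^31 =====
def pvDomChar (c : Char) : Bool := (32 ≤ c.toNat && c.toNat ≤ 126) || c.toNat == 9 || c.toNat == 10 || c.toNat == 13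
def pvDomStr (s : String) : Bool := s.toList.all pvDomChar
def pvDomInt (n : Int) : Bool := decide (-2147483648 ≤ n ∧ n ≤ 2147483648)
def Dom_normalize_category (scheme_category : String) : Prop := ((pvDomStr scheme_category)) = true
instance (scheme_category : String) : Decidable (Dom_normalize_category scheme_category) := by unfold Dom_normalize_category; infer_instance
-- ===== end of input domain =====

-- B replaces A's scan over five candidate prefixes with one partition at the first ' - '
-- plus a membership test of the head in the known-label set (objective: simpler).

-- ===== PORT A =====
def ncPrefixes : List String :=
  ["equity scheme - ", "debt scheme - ", "hybrid scheme - ",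
   "solution oriented scheme - ", "other scheme - "]

-- the 'for prefix in …: if cat.startswith(prefix): cat = cat[len(prefix):]; break' loop
def ncLoop (cat : String) : List String → String
  | [] => cat
  | p :: ps =>
    if PySem.Str.startswith cat p then PySem.Str.slice cat (some (PySem.Str.len p)) none
    else ncLoop cat ps

def normalize_category (scheme_category : String) : Option String :=
  if scheme_category = "" then none
  else
    let cat := PySem.Str.strip (PySem.Str.lower scheme_category)
    let cat := ncLoop cat ncPrefixes
    some (PySem.Str.strip cat)

-- ===== PORT B =====
def ncLabels : PySem.Set String :=
  PySem.Set.ofList ["equity scheme", "debt scheme", "hybrid scheme",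
                    "solution oriented scheme", "other scheme"]

-- hand-port of Python's str.partition(' - ') (PySem has no partition): scan for the FIRST
-- occurrence of the three characters ' - '; 'none' models partition returning sep = ''
-- (separator absent), 'some (head, tail)' the split around the first occurrence — exact
-- for this fixed separator.
def part3 : List Char → Option (List Char × List Char)
  | [] => none
  | c :: cs =>
    if List.isPrefixOf [' ', '-', ' '] (c :: cs) then some ([], (c :: cs).drop 3)
    else (part3 cs).map (fun p => (c :: p.1, p.2))

def normalize_category_alt (scheme_category : String) : Option String :=
  if scheme_category = "" then none
  else
    let cat := PySem.Str.strip (PySem.Str.lower scheme_category)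
    let cat :=
      match part3 cat.toList with
      | some (head, tail) =>
        if PySem.Set.contains ncLabels (String.ofList head) then String.ofList tail else cat
      | none => cat
    some (PySem.Str.strip cat)

-- ===== PRECONDITION & SPEC =====
def Spec_normalize_category (scheme_category : String) (out : Option String) : Prop := out = normalize_category_alt scheme_category
instance (scheme_category : String) (out : Option String) : Decidable (Spec_normalize_category scheme_category out) := by unfold Spec_normalize_category; infer_instance

-- ===== CLAIM (what is proved, stated in full; the proofs are below) =====
def Claim_equal_normalize_category : Prop := ∀ (scheme_category : String), Dom_normalize_category scheme_category → Spec_normalize_category scheme_category (normalize_category scheme_category)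

-- ===== LEMMAS AND PROOFS =====

-- part3 really splits: l = head ++ ' - ' ++ tail
theorem part3_spec (l : List Char) (h t : List Char) (hp : part3 l = some (h, t)) :
    l = h ++ [' ', '-', ' '] ++ t := by
  induction l generalizing h t with
  | nil => simp [part3] at hp
  | cons c cs ih =>
    rw [part3] at hp
    split_ifs at hp with hpre
    · obtain ⟨u, hu⟩ := List.isPrefixOf_iff_prefix.mp hpre
      injection hp with hp
      injection hp with hp1 hp2
      subst hp1
      have hdrop : (c :: cs).drop 3 = u := by
        rw [← hu]
        exact List.drop_left (l₁ := [' ', '-', ' '])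
      rw [← hp2, hdrop, ← hu]
      simp
    · simp only [Option.map_eq_some_iff] at hp
      obtain ⟨⟨h', t'⟩, hcs, he⟩ := hp
      simp only [Prod.mk.injEq] at he
      obtain ⟨he1, he2⟩ := he
      subst he2
      rw [← he1, ih h' t' hcs]
      simp

-- appending on the right does not change where the FIRST separator is
theorem part3_append (p : List Char) (h t a : List Char) (hp : part3 p = some (h, t)) :
    part3 (p ++ a) = some (h, t ++ a) := by
  induction p generalizing h with
  | nil => simp [part3] at hp
  | cons c cs ih =>
    rw [part3] at hp
    split_ifs at hp with hpre
    · have hlen : 3 ≤ (c :: cs).length :=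
        (List.isPrefixOf_iff_prefix.mp hpre).length_le
      have hpre' : List.isPrefixOf [' ', '-', ' '] ((c :: cs) ++ a) = true :=
        List.isPrefixOf_iff_prefix.mpr
          ((List.isPrefixOf_iff_prefix.mp hpre).trans (List.prefix_append _ _))
      injection hp with hp
      injection hp with hp1 hp2
      rw [List.cons_append, part3, if_pos (by simpa using hpre'),
          ← List.cons_append, List.drop_append_of_le_length hlen, hp2, ← hp1]
    · simp only [Option.map_eq_some_iff] at hp
      obtain ⟨⟨h', t'⟩, hcs, he⟩ := hp
      simp only [Prod.mk.injEq] at he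
      obtain ⟨he1, he2⟩ := he
      subst he2
      have hcs' := part3_spec cs h' t' hcs
      have h3 : 3 ≤ cs.length := by
        simp only [hcs', List.length_append, List.length_cons, List.length_nil]
        omega
      obtain ⟨d, cs1, rfl⟩ : ∃ d cs1, cs = d :: cs1 := by
        cases cs with
        | nil => simp at h3
        | cons x xs => exact ⟨x, xs, rfl⟩
      obtain ⟨e, cs2, rfl⟩ : ∃ e cs2, cs1 = e :: cs2 := by
        cases cs1 with
        | nil => simp at h3
        | cons x xs => exact ⟨x, xs, rfl⟩
      obtain ⟨f, cs3, rfl⟩ : ∃ f cs3, cs2 = f :: cs3 := by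
        cases cs2 with
        | nil => simp at h3
        | cons x xs => exact ⟨x, xs, rfl⟩
      rw [List.cons_append, part3, if_neg (by simpa [List.isPrefixOf] using hpre)]
      rw [ih h' hcs]
      simp [← he1]

-- cat starts with the full prefix F = L ++ ' - ' iff part3's head is exactly L
theorem swl (cat F L : String) (h t : List Char)
    (hpF : part3 F.toList = some (L.toList, []))
    (hp : part3 cat.toList = some (h, t)) :
    PySem.Str.startswith cat F = true ↔ h = L.toList := by
  constructor
  · intro hsw
    have hpre : F.toList <+: cat.toList := by
      have : PySem.Chars.startswith cat.toList F.toList = true := by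
        simpa [PySem.Str.startswith] using hsw
      exact List.isPrefixOf_iff_prefix.mp (by simpa [PySem.Chars.startswith] using this)
    obtain ⟨r, hr⟩ := hpre
    have := part3_append F.toList L.toList [] r hpF
    rw [hr, hp] at this
    simp only [Option.some.injEq, Prod.mk.injEq, List.nil_append] at this
    exact this.1
  · intro hh
    have hF : F.toList = L.toList ++ [' ', '-', ' '] := by
      simpa using part3_spec F.toList L.toList [] hpF
    have hcat : cat.toList = F.toList ++ t := by
      rw [part3_spec cat.toList h t hp, hh, hF]
    simp only [PySem.Str.startswith, PySem.Chars.startswith]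
    exact List.isPrefixOf_iff_prefix.mpr (hcat ▸ List.prefix_append _ _)

-- if cat has no ' - ' at all then no full prefix (which contains ' - ') matches
theorem sw_false_of_none (cat F L : String)
    (hpF : part3 F.toList = some (L.toList, []))
    (hp : part3 cat.toList = none) :
    PySem.Str.startswith cat F = false := by
  cases hsw : PySem.Str.startswith cat F with
  | false => rfl
  | true =>
    exfalso
    have hpre : F.toList <+: cat.toList := by
      have : PySem.Chars.startswith cat.toList F.toList = true := by
        simpa [PySem.Str.startswith] using hsw
      exact List.isPrefixOf_iff_prefix.mp (by simpa [PySem.Chars.startswith] using this)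
    obtain ⟨r, hr⟩ := hpre
    have := part3_append F.toList L.toList [] r hpF
    rw [hr, hp] at this
    simp at this

-- cat[len(F):] = tail when part3's head is the matched label
theorem slice_tail (cat F L : String) (h t : List Char)
    (hpF : part3 F.toList = some (L.toList, []))
    (hp : part3 cat.toList = some (h, t)) (hh : h = L.toList) :
    PySem.Str.slice cat (some (PySem.Str.len F)) none = String.ofList t := by
  have hF : F.toList = L.toList ++ [' ', '-', ' '] := by
    simpa using part3_spec F.toList L.toList [] hpF
  have hcat : cat.toList = F.toList ++ t := by
    rw [part3_spec cat.toList h t hp, hh, hF]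
  simp only [PySem.Str.slice, PySem.Str.len, PySem.Chars.slice_eq_listSlice,
    PySem.List.slice_from_natCast, hcat, List.drop_left]

-- contrapositive of swl: a full prefix whose label is not part3's head does not match
theorem sw_false_of_head_ne (cat F L : String) (h t : List Char)
    (hpF : part3 F.toList = some (L.toList, []))
    (hp : part3 cat.toList = some (h, t)) (hne : h ≠ L.toList) :
    PySem.Str.startswith cat F = false := by
  cases hsw : PySem.Str.startswith cat F with
  | false => rfl
  | true => exact absurd ((swl cat F L h t hpF hp).mp hsw) hne

-- the two cores agree
theorem nc_core (cat : String) :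
    ncLoop cat ncPrefixes =
      (match part3 cat.toList with
       | some (head, tail) =>
         if PySem.Set.contains ncLabels (String.ofList head) then String.ofList tail else cat
       | none => cat) := by
  cases hp : part3 cat.toList with
  | none =>
    simp only [ncLoop, ncPrefixes,
      sw_false_of_none cat "equity scheme - " "equity scheme" (by decide) hp,
      sw_false_of_none cat "debt scheme - " "debt scheme" (by decide) hp,
      sw_false_of_none cat "hybrid scheme - " "hybrid scheme" (by decide) hp,
      sw_false_of_none cat "solution oriented scheme - " "solution oriented scheme" (by decide) hp,
      sw_false_of_none cat "other scheme - " "other scheme" (by decide) hp,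
      Bool.false_eq_true, if_false]
  | some pr =>
    obtain ⟨h, t⟩ := pr
    show ncLoop cat ncPrefixes =
      if PySem.Set.contains ncLabels (String.ofList h) then String.ofList t else cat
    by_cases h1 : h = ("equity scheme" : String).toList
    · rw [show ncLoop cat ncPrefixes
            = PySem.Str.slice cat (some (PySem.Str.len "equity scheme - ")) none from by
          simp only [ncLoop, ncPrefixes,
            (swl cat "equity scheme - " "equity scheme" h t (by decide) hp).mpr h1, if_true],
        slice_tail cat "equity scheme - " "equity scheme" h t (by decide) hp h1, h1,
        if_pos (by decide)]
    by_cases h2 : h = ("debt scheme" : String).toList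
    · rw [show ncLoop cat ncPrefixes
            = PySem.Str.slice cat (some (PySem.Str.len "debt scheme - ")) none from by
          simp only [ncLoop, ncPrefixes,
            sw_false_of_head_ne cat "equity scheme - " "equity scheme" h t (by decide) hp
              (by rw [h2]; decide),
            (swl cat "debt scheme - " "debt scheme" h t (by decide) hp).mpr h2,
            Bool.false_eq_true, if_false, if_true],
        slice_tail cat "debt scheme - " "debt scheme" h t (by decide) hp h2, h2,
        if_pos (by decide)]
    by_cases h3 : h = ("hybrid scheme" : String).toList
    · rw [show ncLoop cat ncPrefixes
            = PySem.Str.slice cat (some (PySem.Str.len "hybrid scheme - ")) none from by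
          simp only [ncLoop, ncPrefixes,
            sw_false_of_head_ne cat "equity scheme - " "equity scheme" h t (by decide) hp
              (by rw [h3]; decide),
            sw_false_of_head_ne cat "debt scheme - " "debt scheme" h t (by decide) hp
              (by rw [h3]; decide),
            (swl cat "hybrid scheme - " "hybrid scheme" h t (by decide) hp).mpr h3,
            Bool.false_eq_true, if_false, if_true],
        slice_tail cat "hybrid scheme - " "hybrid scheme" h t (by decide) hp h3, h3,
        if_pos (by decide)]
    by_cases h4 : h = ("solution oriented scheme" : String).toList
    · rw [show ncLoop cat ncPrefixes
            = PySem.Str.slice cat (some (PySem.Str.len "solution oriented scheme - ")) none from by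
          simp only [ncLoop, ncPrefixes,
            sw_false_of_head_ne cat "equity scheme - " "equity scheme" h t (by decide) hp
              (by rw [h4]; decide),
            sw_false_of_head_ne cat "debt scheme - " "debt scheme" h t (by decide) hp
              (by rw [h4]; decide),
            sw_false_of_head_ne cat "hybrid scheme - " "hybrid scheme" h t (by decide) hp
              (by rw [h4]; decide),
            (swl cat "solution oriented scheme - " "solution oriented scheme" h t
              (by decide) hp).mpr h4,
            Bool.false_eq_true, if_false, if_true],
        slice_tail cat "solution oriented scheme - " "solution oriented scheme" h t
          (by decide) hp h4, h4,
        if_pos (by decide)]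
    by_cases h5 : h = ("other scheme" : String).toList
    · rw [show ncLoop cat ncPrefixes
            = PySem.Str.slice cat (some (PySem.Str.len "other scheme - ")) none from by
          simp only [ncLoop, ncPrefixes,
            sw_false_of_head_ne cat "equity scheme - " "equity scheme" h t (by decide) hp
              (by rw [h5]; decide),
            sw_false_of_head_ne cat "debt scheme - " "debt scheme" h t (by decide) hp
              (by rw [h5]; decide),
            sw_false_of_head_ne cat "hybrid scheme - " "hybrid scheme" h t (by decide) hp
              (by rw [h5]; decide),
            sw_false_of_head_ne cat "solution oriented scheme - " "solution oriented scheme" h t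
              (by decide) hp (by rw [h5]; decide),
            (swl cat "other scheme - " "other scheme" h t (by decide) hp).mpr h5,
            Bool.false_eq_true, if_false, if_true],
        slice_tail cat "other scheme - " "other scheme" h t (by decide) hp h5, h5,
        if_pos (by decide)]
    · have hc : PySem.Set.contains ncLabels (String.ofList h) = false := by
        simp only [PySem.Set.contains,
          show ncLabels = ["equity scheme", "debt scheme", "hybrid scheme",
            "solution oriented scheme", "other scheme"] from by decide]
        have key : ∀ L : String, h ≠ L.toList → ¬ String.ofList h = L :=
          fun L hne e => hne (by simpa using congrArg String.toList e)
        simp only [List.contains_cons, List.contains_nil, Bool.or_eq_false_iff]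
        simp [key _ h1, key _ h2, key _ h3, key _ h4, key _ h5]
      rw [hc]
      simp only [ncLoop, ncPrefixes,
        sw_false_of_head_ne cat "equity scheme - " "equity scheme" h t (by decide) hp h1,
        sw_false_of_head_ne cat "debt scheme - " "debt scheme" h t (by decide) hp h2,
        sw_false_of_head_ne cat "hybrid scheme - " "hybrid scheme" h t (by decide) hp h3,
        sw_false_of_head_ne cat "solution oriented scheme - " "solution oriented scheme" h t
          (by decide) hp h4,
        sw_false_of_head_ne cat "other scheme - " "other scheme" h t (by decide) hp h5,
        Bool.false_eq_true, if_false]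

-- ===== VERDICT (by name: the statement is the Claim_ definition above) =====
theorem normalize_category_spec : Claim_equal_normalize_category := by
  intro s _
  unfold Spec_normalize_category normalize_category normalize_category_alt
  split_ifs with h
  · rfl
  · simp only [nc_core]
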